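-- pv_equiv track=rewrite | github.com/plosan/msc_thesis_code | src_python/tools.py | compute_min_gen_set
-- ===== SOURCE A (Python) =====
-- def compute_min_gen_set(monomial_list):
--     """Computes the minimal set of generators of a monomial ideal in a
--     polynomial ring in two variables.
--
--     Args:
--         monomial_list (list): List containing the exponents of the
--             monomials as tuples. Example: [(0,2), (1,3), (0,3)].
--
--     Returns:
--         vertices (list): Minimal generating set for the monomial ideal.
--     """
--     if not monomial_list:
--         return None
--
--     _monomial_list = [tuple(monomial) for monomial in monomial_list]
--     _monomial_list.sort()
--     vertices = [_monomial_list[0]]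
--     for monomial in _monomial_list[1:]:
--         if monomial[0] > vertices[-1][0] and monomial[1] < vertices[-1][1]:
--             vertices.append(monomial)
--
--     return vertices
-- ===== SOURCE B (Python) =====
-- def compute_min_gen_set(monomial_list):
--     """Minimal generating set via the definition: keep exactly the monomials
--     not divisible by any other distinct monomial of the (deduplicated) set."""
--     if not monomial_list:
--         return None
--     unique = sorted(set(tuple(m) for m in monomial_list))
--     return [m for m in unique
--             if not any(n != m and n[0] <= m[0] and n[1] <= m[1] for n in unique)]
-- ===== Notes on version B (the rewrite author's own statement) =====
-- stated objective: alternative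
-- what changed: Replaces A's greedy staircase sweep (append a monomial when it strictly steps past the last kept vertex) with the definition-based minimality filter: sort the deduplicated monomial set and keep exactly the monomials not divisible by any other distinct monomial.
import Mathlib
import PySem

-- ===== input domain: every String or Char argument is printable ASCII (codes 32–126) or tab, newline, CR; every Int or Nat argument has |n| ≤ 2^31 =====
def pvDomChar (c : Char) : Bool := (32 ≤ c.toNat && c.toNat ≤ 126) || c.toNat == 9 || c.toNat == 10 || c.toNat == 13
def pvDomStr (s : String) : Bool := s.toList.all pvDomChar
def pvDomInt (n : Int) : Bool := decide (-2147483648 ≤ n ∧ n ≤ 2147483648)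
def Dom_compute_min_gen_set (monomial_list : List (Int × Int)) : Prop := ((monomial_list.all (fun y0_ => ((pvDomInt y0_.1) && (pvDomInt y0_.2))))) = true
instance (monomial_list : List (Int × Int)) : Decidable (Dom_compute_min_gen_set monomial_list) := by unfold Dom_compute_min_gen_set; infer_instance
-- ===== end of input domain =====

-- B replaces A's single greedy staircase sweep by the definition-based divisibility
-- filter over the sorted deduplicated monomial set (objective: alternative algorithm).


-- ===== PORT A =====
-- loop body of A: append monomial when it steps the staircase down (vertices[-1] via pyGet? -1)
def pvStep (vs : List (Int × Int)) (m : Int × Int) : List (Int × Int) :=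
  match PySem.List.pyGet? vs (-1) with
  | some last => if last.1 < m.1 ∧ m.2 < last.2 then vs ++ [m] else vs
  | none => vs

def compute_min_gen_set (monomial_list : List (Int × Int)) : Option (List (Int × Int)) :=
  if monomial_list = [] then none
  else
    -- _monomial_list.sort(): Python's lexicographic tuple order = the Int ×ₗ Int order
    match PySem.List.sorted monomial_list (fun p => toLex p) false with
    | [] => none  -- unreachable: sorted of a nonempty list is nonempty
    | m0 :: rest => some (rest.foldl pvStep [m0])

-- ===== PORT B =====
def compute_min_gen_set_alt (monomial_list : List (Int × Int)) : Option (List (Int × Int)) :=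
  if monomial_list = [] then none
  else
    let us := PySem.List.sorted (PySem.Set.ofList monomial_list) (fun p => toLex p) false
    some (us.filter (fun m =>
      ! us.any (fun n => decide (n ≠ m) && decide (n.1 ≤ m.1) && decide (n.2 ≤ m.2))))

-- ===== PRECONDITION & SPEC =====
def Spec_compute_min_gen_set (monomial_list : List (Int × Int)) (out : Option (List (Int × Int))) : Prop := out = compute_min_gen_set_alt monomial_list
instance (monomial_list : List (Int × Int)) (out : Option (List (Int × Int))) : Decidable (Spec_compute_min_gen_set monomial_list out) := by unfold Spec_compute_min_gen_set; infer_instance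

-- ===== CLAIM (what is proved, stated in full; the proofs are below) =====
def Claim_equal_compute_min_gen_set : Prop := ∀ (monomial_list : List (Int × Int)), Dom_compute_min_gen_set monomial_list → Spec_compute_min_gen_set monomial_list (compute_min_gen_set monomial_list)

-- ===== LEMMAS AND PROOFS =====

-- the staircase selection with running minimal y-exponent
def pvSel : List (Int × Int) → Int → List (Int × Int)
  | [], _ => []
  | m :: t, y => if m.2 < y then m :: pvSel t m.2 else pvSel t y

-- adjacent-duplicate removal (keeps the last copy of a run)
def pvDedup : List (Int × Int) → List (Int × Int)
  | [] => []
  | [a] => [a]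
  | a :: b :: t => if a = b then pvDedup (b :: t) else a :: pvDedup (b :: t)

theorem pvStep_self (vs : List (Int × Int)) (a : Int × Int) :
    pvStep (pvStep vs a) a = pvStep vs a := by
  unfold pvStep
  rcases h : PySem.List.pyGet? vs (-1) with _ | last
  · simp [h]
  · by_cases hc : last.1 < a.1 ∧ a.2 < last.2
    · simp only [if_pos hc]
      rw [PySem.List.pyGet?_neg_one_append_singleton]
      simp
    · simp [h, hc]

theorem pvFoldl_dedup (s : List (Int × Int)) :
    ∀ vs : List (Int × Int), s.foldl pvStep vs = (pvDedup s).foldl pvStep vs := by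
  induction s with
  | nil => intro vs; rfl
  | cons a t ih =>
    intro vs
    match t, ih with
    | [], _ => rfl
    | b :: t', ih =>
      by_cases hab : a = b
      · show (b :: t').foldl pvStep (pvStep vs a) = _
        simp only [pvDedup, if_pos hab]
        rw [← ih vs]
        show (t').foldl pvStep (pvStep (pvStep vs a) b) = (t').foldl pvStep (pvStep vs b)
        rw [hab, pvStep_self]
      · simp only [pvDedup, if_neg hab]
        show (b :: t').foldl pvStep (pvStep vs a) = (pvDedup (b :: t')).foldl pvStep (pvStep vs a)
        exact ih (pvStep vs a)

theorem pvMem_dedup (s : List (Int × Int)) (x : Int × Int) : x ∈ pvDedup s ↔ x ∈ s := by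
  induction s with
  | nil => simp [pvDedup]
  | cons a t ih =>
    match t, ih with
    | [], _ => simp [pvDedup]
    | b :: t', ih =>
      by_cases hab : a = b
      · simp only [pvDedup, if_pos hab]
        rw [ih]
        simp [hab]
      · simp only [pvDedup, if_neg hab]
        simp [ih]

theorem pvDedup_head (a : Int × Int) (t : List (Int × Int)) :
    (pvDedup (a :: t)).head? = some a := by
  induction t generalizing a with
  | nil => rfl
  | cons b t' ih =>
    by_cases hab : a = b
    · simp only [pvDedup, if_pos hab]; rw [ih b, hab]
    · simp [pvDedup, if_neg hab]

theorem pvDedup_pairwise (s : List (Int × Int))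
    (h : s.Pairwise (fun a b => toLex a ≤ toLex b)) :
    (pvDedup s).Pairwise (fun a b => toLex a < toLex b) := by
  induction s with
  | nil => exact List.Pairwise.nil
  | cons a t ih =>
    match t, h, ih with
    | [], _, _ => simp [pvDedup]
    | b :: t', h, ih =>
      rcases List.pairwise_cons.1 h with ⟨hfa, htl⟩
      by_cases hab : a = b
      · simpa [pvDedup, if_pos hab] using ih htl
      · simp only [pvDedup, if_neg hab]
        refine List.pairwise_cons.2 ⟨?_, ih htl⟩
        intro x hx
        have hxab : x ∈ b :: t' := (pvMem_dedup _ _).1 hx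
        have hax : toLex a ≤ toLex x := hfa x hxab
        rcases lt_or_eq_of_le hax with hlt | heq
        · exact hlt
        · exfalso
          have hxa : x = a := (toLex_inj.1 heq.symm)
          rcases List.mem_cons.1 hxab with hxb | hxt
          · exact hab (hxa.symm.trans hxb)
          · have hbx : toLex b ≤ toLex x := (List.pairwise_cons.1 htl).1 x hxt
            have hab' : toLex a ≤ toLex b := hfa b (List.mem_cons_self)
            have : toLex a = toLex b := le_antisymm hab' (hxa ▸ hbx)
            exact hab (toLex_inj.1 this)

-- greedy sweep over a strictly lex-increasing tail = staircase selection
theorem pvGreedy_eq_sel (rest : List (Int × Int)) :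
    ∀ (ws : List (Int × Int)) (v : Int × Int),
      (∀ m ∈ rest, toLex v < toLex m) →
      rest.Pairwise (fun a b => toLex a < toLex b) →
      rest.foldl pvStep (ws ++ [v]) = ws ++ [v] ++ pvSel rest v.2 := by
  induction rest with
  | nil => intro ws v _ _; simp [pvSel]
  | cons m t ih =>
    intro ws v hv hp
    rcases List.pairwise_cons.1 hp with ⟨hm, ht⟩
    have hvm := hv m List.mem_cons_self
    have hvm' : v.1 < m.1 ∨ (v.1 = m.1 ∧ v.2 < m.2) := by
      rcases Prod.Lex.lt_iff.1 hvm with h | h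
      · exact Or.inl h
      · exact Or.inr h
    by_cases hy : m.2 < v.2
    · have hx : v.1 < m.1 := by rcases hvm' with h | ⟨h1, h2⟩ <;> omega
      have hstep : pvStep (ws ++ [v]) m = (ws ++ [v]) ++ [m] := by
        unfold pvStep
        rw [PySem.List.pyGet?_neg_one_append_singleton]
        simp [hx, hy]
      show t.foldl pvStep (pvStep (ws ++ [v]) m) = _
      rw [hstep, ih (ws ++ [v]) m hm ht]
      simp [pvSel, hy]
    · have hstep : pvStep (ws ++ [v]) m = ws ++ [v] := by
        unfold pvStep
        rw [PySem.List.pyGet?_neg_one_append_singleton]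
        simp only
        rw [if_neg]
        rintro ⟨_, h2⟩; exact hy h2
      show t.foldl pvStep (pvStep (ws ++ [v]) m) = _
      rw [hstep, ih ws v (fun x hx => hv x (List.mem_cons_of_mem _ hx)) ht]
      simp [pvSel, hy]

-- B's divisibility predicate over the whole sorted-unique list
def pvPred (u : List (Int × Int)) (m : Int × Int) : Bool :=
  ! u.any (fun n => decide (n ≠ m) && decide (n.1 ≤ m.1) && decide (n.2 ≤ m.2))

-- pointwise: in a strictly lex-sorted list, a divisor of m can only come before m,
-- and then its x-exponent is automatically ≤; only its y-exponent matters
theorem pvPred_iff (pref t : List (Int × Int)) (m : Int × Int)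
    (hp : (pref ++ m :: t).Pairwise (fun a b => toLex a < toLex b)) :
    pvPred (pref ++ m :: t) m = true ↔ ¬ ∃ n ∈ pref, n.2 ≤ m.2 := by
  have hpre : ∀ n ∈ pref, toLex n < toLex m := by
    intro n hn
    exact (List.pairwise_append.1 hp).2.2 n hn m List.mem_cons_self
  have hsuf : ∀ n ∈ t, toLex m < toLex n := by
    intro n hn
    exact (List.pairwise_cons.1 (List.pairwise_append.1 hp).2.1).1 n hn
  unfold pvPred
  simp only [Bool.not_eq_eq_eq_not, Bool.not_true, List.any_eq_false]
  constructor
  · intro h ⟨n, hn, hny⟩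
    have := h n (List.mem_append_left _ hn)
    have hlt := hpre n hn
    have hne : n ≠ m := by rintro rfl; exact lt_irrefl _ hlt
    have hx : n.1 ≤ m.1 := by
      rcases Prod.Lex.lt_iff.1 hlt with h' | ⟨h', _⟩
      · exact le_of_lt h'
      · exact le_of_eq h'
    rw [show (decide (n ≠ m) && decide (n.1 ≤ m.1) && decide (n.2 ≤ m.2)) = true by
      simp [hne, hx, hny]] at this
    exact this rfl
  · intro h n hn hc
    simp only [Bool.and_eq_true, decide_eq_true_eq] at hc
    obtain ⟨⟨hne, hx⟩, hy2⟩ := hc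
    rcases List.mem_append.1 hn with hnp | hnm
    · exact h ⟨n, hnp, hy2⟩
    · rcases List.mem_cons.1 hnm with rfl | hnt
      · exact hne rfl
      · have hlt := hsuf n hnt
        rcases Prod.Lex.lt_iff.1 hlt with h' | ⟨h1, h2⟩
        · exact absurd hx (not_le.2 h')
        · exact absurd hy2 (not_le.2 h2)

-- the filter over a strictly lex-sorted tail = staircase selection, where y is the
-- minimal y-exponent of the prefix (stated extensionally)
theorem pvFilter_eq_sel (rest : List (Int × Int)) :
    ∀ (pref : List (Int × Int)) (y : Int),
      (pref ++ rest).Pairwise (fun a b => toLex a < toLex b) →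
      (∀ z : Int, (∃ n ∈ pref, n.2 ≤ z) ↔ y ≤ z) →
      rest.filter (pvPred (pref ++ rest)) = pvSel rest y := by
  induction rest with
  | nil => intro pref y _ _; rfl
  | cons m t ih =>
    intro pref y hp hy
    have hpred := pvPred_iff pref t m hp
    have hassoc : pref ++ m :: t = (pref ++ [m]) ++ t := by simp
    by_cases hkeep : m.2 < y
    · have hpm : pvPred (pref ++ m :: t) m = true := by
        rw [hpred]
        rintro ⟨n, hn, hny⟩
        have := (hy n.2).1 ⟨n, hn, le_refl _⟩
        omega
      rw [List.filter_cons_of_pos hpm]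
      have ht : t.filter (pvPred ((pref ++ [m]) ++ t)) = pvSel t m.2 := by
        refine ih (pref ++ [m]) m.2 (by rw [← hassoc]; exact hp) ?_
        intro z
        constructor
        · rintro ⟨n, hn, hnz⟩
          rcases List.mem_append.1 hn with hn | hn
          · have := (hy n.2).1 ⟨n, hn, le_refl _⟩
            omega
          · simp at hn; subst hn; exact hnz
        · intro hz; exact ⟨m, by simp, hz⟩
      rw [← hassoc] at ht
      rw [ht]
      simp [pvSel, hkeep]
    · have hpm : pvPred (pref ++ m :: t) m = false := by
        by_cases h : pvPred (pref ++ m :: t) m = true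
        · exfalso
          rcases (hy y).2 (le_refl y) with ⟨n, hn, hny⟩
          exact (hpred.1 h) ⟨n, hn, by omega⟩
        · simpa using h
      rw [List.filter_cons_of_neg (by simp [hpm])]
      have ht : t.filter (pvPred ((pref ++ [m]) ++ t)) = pvSel t y := by
        refine ih (pref ++ [m]) y (by rw [← hassoc]; exact hp) ?_
        intro z
        constructor
        · rintro ⟨n, hn, hnz⟩
          rcases List.mem_append.1 hn with hn | hn
          · exact (hy z).1 ⟨n, hn, hnz⟩
          · simp at hn; subst hn; omega
        · intro hz
          rcases (hy z).2 hz with ⟨n, hn, hnz⟩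
          exact ⟨n, List.mem_append_left _ hn, hnz⟩
      rw [← hassoc] at ht
      rw [ht]
      simp [pvSel, hkeep]

-- the two results over any strictly lex-sorted nonempty list coincide
theorem pvGreedy_eq_filter (m0 : Int × Int) (rest : List (Int × Int))
    (hp : (m0 :: rest).Pairwise (fun a b => toLex a < toLex b)) :
    rest.foldl pvStep [m0] = (m0 :: rest).filter (pvPred (m0 :: rest)) := by
  rcases List.pairwise_cons.1 hp with ⟨hm0, hrest⟩
  have hg : rest.foldl pvStep ([] ++ [m0]) = [] ++ [m0] ++ pvSel rest m0.2 :=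
    pvGreedy_eq_sel rest [] m0 hm0 hrest
  have hf0 : pvPred (m0 :: rest) m0 = true := by
    have := pvPred_iff [] rest m0 (by simpa using hp)
    simp at this
    simp [this]
  have hf : rest.filter (pvPred (([m0]) ++ rest)) = pvSel rest m0.2 := by
    refine pvFilter_eq_sel rest [m0] m0.2 (by simpa using hp) ?_
    intro z; simp
  calc rest.foldl pvStep [m0] = [m0] ++ pvSel rest m0.2 := by simpa using hg
    _ = m0 :: rest.filter (pvPred (m0 :: rest)) := by
        rw [show ([m0] : List (Int × Int)) ++ rest = m0 :: rest from rfl] at hf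
        rw [hf]
        rfl
    _ = (m0 :: rest).filter (pvPred (m0 :: rest)) := by
        rw [List.filter_cons_of_pos hf0]

-- ===== VERDICT (by name: the statement is the Claim_ definition above) =====
theorem compute_min_gen_set_spec : Claim_equal_compute_min_gen_set := by
  intro l _
  unfold Spec_compute_min_gen_set compute_min_gen_set compute_min_gen_set_alt
  by_cases hl : l = []
  · simp [hl]
  · simp only [if_neg hl]
    set s := PySem.List.sorted l (fun p => toLex p) false with hs
    set u := PySem.List.sorted (PySem.Set.ofList l) (fun p => toLex p) false with hu
    have hsle : s.Pairwise (fun a b => toLex a ≤ toLex b) :=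
      PySem.List.sorted_pairwise l (fun p => toLex p)
    have hsne : s ≠ [] := by
      rw [hs]; rw [Ne, PySem.List.sorted_eq_nil_iff]; exact hl
    -- u is exactly pvDedup s
    have hdp : (pvDedup s).Pairwise (fun a b => toLex a < toLex b) := pvDedup_pairwise s hsle
    have hnd : (pvDedup s).Nodup := by
      refine List.Pairwise.imp ?_ hdp
      intro a b h; rintro rfl; exact lt_irrefl _ h
    have hud : u = pvDedup s := by
      rw [hu]
      refine PySem.List.sorted_eq_of_perm_of_pairwise_lt (PySem.Set.ofList l) (pvDedup s) (fun p => toLex p) ?_ hdp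
      refine (List.perm_ext_iff_of_nodup hnd (PySem.Set.nodup_ofList l)).2 ?_
      intro a
      rw [pvMem_dedup, hs, PySem.List.mem_sorted, PySem.Set.mem_ofList]
    rcases hm : s with _ | ⟨m0, rest⟩
    · exact absurd hm hsne
    · simp only
      -- pvDedup s is nonempty with the same head m0
      rcases hdm : pvDedup s with _ | ⟨d0, drest⟩
      · exfalso
        have : m0 ∈ pvDedup s := (pvMem_dedup s m0).2 (hm ▸ List.mem_cons_self)
        rw [hdm] at this; simp at this
      · have hd0 : d0 = m0 := by
          have h1 := pvDedup_head m0 rest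
          rw [← hm, hdm] at h1
          simpa using h1
        rw [hd0] at hdm
        -- greedy over s = greedy over pvDedup s
        have hdpw : (m0 :: drest).Pairwise (fun a b => toLex a < toLex b) := hdm ▸ hdp
        have h1 : rest.foldl pvStep [m0] = drest.foldl pvStep [m0] := by
          have e1 : s.foldl pvStep [m0] = (pvDedup s).foldl pvStep [m0] := pvFoldl_dedup s [m0]
          rw [hdm, hm] at e1
          have hstep0 : pvStep [m0] m0 = [m0] := by
            unfold pvStep
            rw [show ([m0] : List (Int × Int)) = [] ++ [m0] from rfl,
              PySem.List.pyGet?_neg_one_append_singleton]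
            simp
          simpa [List.foldl_cons, hstep0] using e1
        rw [h1, hud, hdm]
        rw [pvGreedy_eq_filter m0 drest hdpw]
        rfl
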